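-- pv_equiv track=rewrite | github.com/jesperfjellin-kv/Omkod_NRL_til_FKB | omkod_NRL_til_FKB.py | missing_kvalitet
-- ===== SOURCE A (Python) =====
-- def capitalize_key_only(line):
--     """
--     Kapitaliserer nøkkelord i en linje mens resten av innholdet forblir uendret.
--     """
--     parts = line.split(maxsplit=1)
--     if len(parts) == 2:
--         parts[0] = parts[0].upper()
--         return ' '.join(parts)
--     return line.upper()
--
-- def missing_kvalitet(lines):
--     """
--     Sjekker og legger til manglende kvalitetsattributter i objekter.
--     """
--     modified_lines = []
--     current_object_lines = []
--     kvalitet_present = False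
--     in_kvalitet_block = False
--
--     for line in lines:
--         if line.strip().startswith('.PUNKT') or line.strip().startswith('.KURVE'):
--             if current_object_lines:
--                 if kvalitet_present:
--                     current_object_lines = [capitalize_key_only(line) if line.strip().startswith('...') else line for line in current_object_lines]
--                 modified_lines.extend(current_object_lines)
--             current_object_lines = [line]
--             kvalitet_present = False
--             in_kvalitet_block = False
--         else:
--             if line.strip().startswith('..KVALITET'):
--                 kvalitet_present = True
--                 in_kvalitet_block = True
--             elif line.strip().startswith('..') and not line.strip().startswith('...'):
--                 if in_kvalitet_block:
--                     kvalitet_present = False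
--                     in_kvalitet_block = False
--                     current_object_lines = [capitalize_key_only(line) if line.strip().startswith('...') else line for line in current_object_lines]
--             elif in_kvalitet_block and line.strip().startswith('...'):
--                 line = capitalize_key_only(line)
--
--             current_object_lines.append(line)
--
--     if current_object_lines:
--         if kvalitet_present:
--             current_object_lines = [capitalize_key_only(line) if line.strip().startswith('...') else line for line in current_object_lines]
--         modified_lines.extend(current_object_lines)
--
--     return modified_lines
-- ===== SOURCE B (Python) =====
-- def capitalize_key_only(line):
--     """
--     Kapitaliserer nøkkelord i en linje mens resten av innholdet forblir uendret.
--     """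
--     parts = line.split(maxsplit=1)
--     if len(parts) == 2:
--         parts[0] = parts[0].upper()
--         return ' '.join(parts)
--     return line.upper()
--
--
-- def missing_kvalitet(lines):
--     """
--     Sjekker og legger til manglende kvalitetsattributter i objekter.
--
--     Two-pass rewrite: partition the lines into object blocks, then for each
--     block decide once which '...' lines must get a capitalized key: all of
--     them when the block ends inside an open ..KVALITET region, otherwise the
--     ones before the last '..' line that closed an open ..KVALITET region.
--     """
--     blocks = []
--     current = []
--     for line in lines:
--         s = line.strip()
--         if s.startswith('.PUNKT') or s.startswith('.KURVE'):
--             if current: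
--                 blocks.append(current)
--             current = [line]
--         else:
--             current.append(line)
--     if current:
--         blocks.append(current)
--
--     out = []
--     for block in blocks:
--         open_kvalitet = False
--         present_at_end = False
--         last_close = -1
--         for i, line in enumerate(block):
--             s = line.strip()
--             if s.startswith('..KVALITET'):
--                 open_kvalitet = True
--                 present_at_end = True
--             elif s.startswith('..') and not s.startswith('...'):
--                 if open_kvalitet:
--                     open_kvalitet = False
--                     present_at_end = False
--                     last_close = i
--         for i, line in enumerate(block):
--             if line.strip().startswith('...') and (present_at_end or i < last_close):
--                 out.append(capitalize_key_only(line))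
--             else:
--                 out.append(line)
--     return out
-- ===== Notes on version B (the rewrite author's own statement) =====
-- stated objective: alternative
-- what changed: A streams through the lines with a mutable state machine that re-capitalizes the accumulated current-object buffer at each KVALITET-close and at block flush; B first partitions the lines into object blocks, then for each block computes in one scan whether it ends inside an open ..KVALITET region and the index of the last closing '..' line, and finally emits each line capped or not by a per-index test.
import Mathlib
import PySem

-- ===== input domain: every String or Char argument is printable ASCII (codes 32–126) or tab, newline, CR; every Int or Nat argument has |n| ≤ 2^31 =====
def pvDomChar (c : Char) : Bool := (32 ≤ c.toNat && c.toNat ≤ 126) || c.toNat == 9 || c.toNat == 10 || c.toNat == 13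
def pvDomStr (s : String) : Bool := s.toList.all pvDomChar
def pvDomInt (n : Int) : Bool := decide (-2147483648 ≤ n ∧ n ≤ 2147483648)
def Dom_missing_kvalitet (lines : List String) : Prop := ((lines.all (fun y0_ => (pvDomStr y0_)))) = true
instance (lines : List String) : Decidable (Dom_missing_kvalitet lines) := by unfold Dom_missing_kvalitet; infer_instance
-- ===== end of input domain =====

-- B re-decomposes A's streaming re-capitalising state machine into independent per-object-block
-- two-pass processing (scan once for the block's KVALITET state, then cap by index); same return value.

-- ===== PORT A =====

-- line.strip().startswith(p) — shared by both ports
def stripStarts (line p : String) : Bool := PySem.Str.startswith (PySem.Str.strip line) p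

def capitalize_key_only (line : String) : String :=
  match PySem.Str.split₀Max line 1 with   -- line.split(maxsplit=1): 0, 1 or 2 parts
  | [p0, p1] => PySem.Str.join " " [PySem.Str.upper p0, p1]
  | _ => PySem.Str.upper line

-- the comprehension body: capitalize_key_only(line) if line.strip().startswith('...') else line
def recapLine (l : String) : String := if stripStarts l "..." then capitalize_key_only l else l

-- A's for-loop: (lines, modified_lines, current_object_lines, kvalitet_present, in_kvalitet_block)
def missingKvGo : List String → List String → List String → Bool → Bool → List String
  | [], modified, cur, pres, _opn =>
      modified ++ (if cur.isEmpty then [] else if pres then cur.map recapLine else cur)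
  | l :: rest, modified, cur, pres, opn =>
      if stripStarts l ".PUNKT" || stripStarts l ".KURVE" then
        missingKvGo rest (modified ++ (if cur.isEmpty then [] else if pres then cur.map recapLine else cur)) [l] false false
      else if stripStarts l "..KVALITET" then
        missingKvGo rest modified (cur ++ [l]) true true
      else if stripStarts l ".." && !stripStarts l "..." then
        (if opn then missingKvGo rest modified (cur.map recapLine ++ [l]) false false
         else missingKvGo rest modified (cur ++ [l]) pres opn)
      else if opn && stripStarts l "..." then
        missingKvGo rest modified (cur ++ [capitalize_key_only l]) pres opn
      else missingKvGo rest modified (cur ++ [l]) pres opn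

def missing_kvalitet (lines : List String) : List String :=
  missingKvGo lines [] [] false false

-- ===== PORT B =====

-- partition into object blocks (a block starts at each .PUNKT/.KURVE line)
def splitBlocksB : List String → List String → List (List String)
  | [], cur => if cur.isEmpty then [] else [cur]
  | l :: rest, cur =>
      if stripStarts l ".PUNKT" || stripStarts l ".KURVE" then
        (if cur.isEmpty then [] else [cur]) ++ splitBlocksB rest [l]
      else splitBlocksB rest (cur ++ [l])

-- first pass over a block: (open_kvalitet, present_at_end, last_close)
def scanStepB (st : Bool × Bool × Int) (p : String × Nat) : Bool × Bool × Int :=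
  if stripStarts p.1 "..KVALITET" then (true, true, st.2.2)
  else if stripStarts p.1 ".." && !stripStarts p.1 "..." then
    (if st.1 then (false, false, (p.2 : Int)) else st)
  else st

-- second pass: capitalize the '...' lines selected by the scan result
def processBlockB (block : List String) : List String :=
  let st := block.zipIdx.foldl scanStepB (false, false, -1)
  block.zipIdx.map (fun p =>
    if stripStarts p.1 "..." && (st.2.1 || decide ((p.2 : Int) < st.2.2)) then capitalize_key_only p.1
    else p.1)

def missing_kvalitet_alt (lines : List String) : List String :=
  (splitBlocksB lines []).flatMap processBlockB

-- ===== PRECONDITION & SPEC =====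
def Spec_missing_kvalitet (lines : List String) (out : List String) : Prop := out = missing_kvalitet_alt lines
instance (lines : List String) (out : List String) : Decidable (Spec_missing_kvalitet lines out) := by unfold Spec_missing_kvalitet; infer_instance

-- ===== CLAIM (what is proved, stated in full; the proofs are below) =====
def Claim_equal_missing_kvalitet : Prop := ∀ (lines : List String), Dom_missing_kvalitet lines → Spec_missing_kvalitet lines (missing_kvalitet lines)

-- ===== LEMMAS AND PROOFS =====

-- ---- character-level facts about upperChar / isspace ----

theorem islower_iff (c : Char) : PySem.Chars.islower c = true ↔ 97 ≤ c.toNat ∧ c.toNat ≤ 122 := by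
  unfold PySem.Chars.islower
  simp only [Bool.and_eq_true, decide_eq_true_eq, Char.le_def]
  constructor
  · rintro ⟨h1, h2⟩
    exact ⟨UInt32.le_iff_toNat_le.mp h1, UInt32.le_iff_toNat_le.mp h2⟩
  · rintro ⟨h1, h2⟩
    exact ⟨UInt32.le_iff_toNat_le.mpr h1, UInt32.le_iff_toNat_le.mpr h2⟩

theorem isspace_iff (c : Char) : PySem.Chars.isspace c = true ↔ (c.toNat = 32 ∨ (9 ≤ c.toNat ∧ c.toNat ≤ 13) ∨ (28 ≤ c.toNat ∧ c.toNat ≤ 31) ∨ c.toNat = 133 ∨ c.toNat = 160 ∨ c.toNat = 5760 ∨ (8192 ≤ c.toNat ∧ c.toNat ≤ 8202) ∨ c.toNat = 8232 ∨ c.toNat = 8233 ∨ c.toNat = 8239 ∨ c.toNat = 8287 ∨ c.toNat = 12288) := by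
  unfold PySem.Chars.isspace
  simp only [Bool.or_eq_true, Bool.and_eq_true, decide_eq_true_eq]
  tauto

theorem upperChar_toNat (c : Char) (h : PySem.Chars.islower c = true) :
    (PySem.Chars.upperChar c).toNat = c.toNat - 32 := by
  rw [islower_iff] at h
  unfold PySem.Chars.upperChar
  rw [if_pos ((islower_iff c).mpr h)]
  rw [Char.toNat_ofNat, if_pos]
  constructor; omega

theorem isspace_upperChar (c : Char) : PySem.Chars.isspace (PySem.Chars.upperChar c) = PySem.Chars.isspace c := by
  by_cases h : PySem.Chars.islower c = true
  · have hv := upperChar_toNat c h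
    rw [islower_iff] at h
    have h1 : PySem.Chars.isspace (PySem.Chars.upperChar c) = false := by
      rw [← Bool.not_eq_true, isspace_iff]; omega
    have h2 : PySem.Chars.isspace c = false := by
      rw [← Bool.not_eq_true, isspace_iff]; omega
    rw [h1, h2]
  · unfold PySem.Chars.upperChar; rw [if_neg h]

theorem islower_upperChar (c : Char) : PySem.Chars.islower (PySem.Chars.upperChar c) = false := by
  by_cases h : PySem.Chars.islower c = true
  · have hv := upperChar_toNat c h
    rw [islower_iff] at h
    rw [← Bool.not_eq_true, islower_iff]; omega
  · unfold PySem.Chars.upperChar; rw [if_neg h]; simpa using h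

theorem upperChar_idem (c : Char) : PySem.Chars.upperChar (PySem.Chars.upperChar c) = PySem.Chars.upperChar c := by
  have h := islower_upperChar c
  conv_lhs => rw [PySem.Chars.upperChar]
  rw [h]; simp

theorem upperChar_dot : PySem.Chars.upperChar '.' = '.' := by decide

theorem isspace_dot : PySem.Chars.isspace '.' = false := by decide

theorem isspace_space : PySem.Chars.isspace ' ' = true := by decide

theorem dropWhile_head_false (p : Char → Bool) (l : List Char) (c : Char) (x : List Char)
    (h : List.dropWhile p l = c :: x) : p c = false := by
  induction l with
  | nil => simp at h
  | cons a l ih =>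
    rw [List.dropWhile_cons] at h
    by_cases hp : p a = true
    · rw [if_pos hp] at h; exact ih h
    · rw [if_neg hp] at h
      obtain ⟨rfl, -⟩ := List.cons.inj h
      simpa using hp

-- ---- strip/split commutation with upper ----

theorem dropWhile_isspace_upper (cs : List Char) :
    List.dropWhile PySem.Chars.isspace (PySem.Chars.upper cs)
      = PySem.Chars.upper (List.dropWhile PySem.Chars.isspace cs) := by
  unfold PySem.Chars.upper
  rw [List.dropWhile_map]
  simp [Function.comp_def, isspace_upperChar]

theorem dropWhile_nsp_upper (cs : List Char) :
    List.dropWhile (fun c => !PySem.Chars.isspace c) (PySem.Chars.upper cs)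
      = PySem.Chars.upper (List.dropWhile (fun c => !PySem.Chars.isspace c) cs) := by
  unfold PySem.Chars.upper
  rw [List.dropWhile_map]
  simp [Function.comp_def, isspace_upperChar]

theorem takeWhile_nsp_upper (cs : List Char) :
    List.takeWhile (fun c => !PySem.Chars.isspace c) (PySem.Chars.upper cs)
      = PySem.Chars.upper (List.takeWhile (fun c => !PySem.Chars.isspace c) cs) := by
  unfold PySem.Chars.upper
  rw [List.takeWhile_map]
  simp [Function.comp_def, isspace_upperChar]

theorem rstrip_upper (cs : List Char) :
    PySem.Chars.rstrip (PySem.Chars.upper cs) = PySem.Chars.upper (PySem.Chars.rstrip cs) := by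
  unfold PySem.Chars.rstrip PySem.Chars.upper
  rw [← List.map_reverse, List.dropWhile_map, ← List.map_reverse]
  simp [Function.comp_def, isspace_upperChar]

theorem strip_upper (cs : List Char) :
    PySem.Chars.strip (PySem.Chars.upper cs) = PySem.Chars.upper (PySem.Chars.strip cs) := by
  unfold PySem.Chars.strip PySem.Chars.lstrip
  rw [dropWhile_isspace_upper, rstrip_upper]

theorem upper_idem (cs : List Char) : PySem.Chars.upper (PySem.Chars.upper cs) = PySem.Chars.upper cs := by
  unfold PySem.Chars.upper
  rw [List.map_map]
  congr 1
  funext c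
  exact upperChar_idem c

-- ---- split(maxsplit=1) characterisation ----

theorem go_succ (fuel m : Nat) (l : List Char) (acc : List (List Char)) :
    PySem.Chars.split₀Max.go (fuel+1) m l acc =
      match List.dropWhile PySem.Chars.isspace l with
      | [] => acc.reverse
      | l' => if m = 0 then (l' :: acc).reverse
          else PySem.Chars.split₀Max.go fuel (m-1) (List.dropWhile (fun c => !PySem.Chars.isspace c) l')
                 (List.takeWhile (fun c => !PySem.Chars.isspace c) l' :: acc) := by
  rfl

theorem go_zero (fuel : Nat) (l : List Char) (acc : List (List Char)) (h : 0 < fuel) :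
    PySem.Chars.split₀Max.go fuel 0 l acc =
      if List.dropWhile PySem.Chars.isspace l = [] then acc.reverse
      else ((List.dropWhile PySem.Chars.isspace l) :: acc).reverse := by
  obtain ⟨k, rfl⟩ : ∃ k, fuel = k + 1 := ⟨fuel - 1, by omega⟩
  rw [go_succ]
  rcases hd : List.dropWhile PySem.Chars.isspace l with _ | ⟨c, r⟩ <;> simp

theorem split1_eq (cs : List Char) :
    PySem.Chars.split₀Max cs 1 =
      (let l' := cs.dropWhile PySem.Chars.isspace
       if l' = [] then []
       else
         let tok := l'.takeWhile (fun c => !PySem.Chars.isspace c)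
         let rest := (l'.dropWhile (fun c => !PySem.Chars.isspace c)).dropWhile PySem.Chars.isspace
         if rest = [] then [tok] else [tok, rest]) := by
  unfold PySem.Chars.split₀Max
  rw [if_neg (by omega)]
  have h1 : (1:Int).toNat = 1 := rfl
  rw [h1, go_succ]
  rcases hd : cs.dropWhile PySem.Chars.isspace with _ | ⟨c, rest0⟩
  · simp
  · have hne : cs ≠ [] := by
      intro h; subst h; simp at hd
    have hlen : 0 < cs.length := List.length_pos_iff.mpr hne
    simp only []
    rw [if_neg (by omega)]
    show PySem.Chars.split₀Max.go cs.length 0 _ _ = _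
    rw [go_zero _ _ _ hlen]
    rcases hr : List.dropWhile PySem.Chars.isspace (List.dropWhile (fun c => !PySem.Chars.isspace c) (c :: rest0)) with _ | ⟨d, r2⟩ <;> simp

theorem split1_upper (cs : List Char) :
    PySem.Chars.split₀Max (PySem.Chars.upper cs) 1 = (PySem.Chars.split₀Max cs 1).map PySem.Chars.upper := by
  rw [split1_eq, split1_eq]
  simp only [dropWhile_isspace_upper, dropWhile_nsp_upper, takeWhile_nsp_upper]
  by_cases h : cs.dropWhile PySem.Chars.isspace = []
  · simp [h, PySem.Chars.upper]
  · rw [if_neg h, if_neg (by simpa [PySem.Chars.upper] using h)]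
    by_cases h2 : (List.dropWhile PySem.Chars.isspace ((cs.dropWhile PySem.Chars.isspace).dropWhile (fun c => !PySem.Chars.isspace c))) = []
    · simp [dropWhile_isspace_upper, h2, PySem.Chars.upper]
    · rw [if_neg (by simpa [PySem.Chars.upper] using h2), if_neg h2]
      simp

-- ---- rstrip over a nonspace prefix, '...' shape facts ----

theorem dropWhile_eq_self_of_all_false (p : Char → Bool) (l : List Char)
    (h : ∀ c ∈ l, p c = false) : List.dropWhile p l = l := by
  cases l with
  | nil => rfl
  | cons a t => rw [List.dropWhile_cons, h a (by simp)]; rfl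

theorem rstrip_append_nonspace (q t : List Char) (hq : ∀ c ∈ q, PySem.Chars.isspace c = false) :
    PySem.Chars.rstrip (q ++ t) = q ++ PySem.Chars.rstrip t := by
  unfold PySem.Chars.rstrip
  rw [List.reverse_append, List.dropWhile_append]
  by_cases hd : (List.dropWhile PySem.Chars.isspace t.reverse).isEmpty
  · rw [if_pos hd]
    rw [dropWhile_eq_self_of_all_false _ _ (by intro c hc; exact hq c (by simpa using hc))]
    rw [List.isEmpty_iff] at hd
    simp [hd]
  · rw [if_neg hd]
    simp [List.reverse_append]

theorem dots_shape (cs : List Char)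
    (h : PySem.Chars.startswith (PySem.Chars.strip cs) ['.', '.', '.'] = true) :
    ∃ t, cs.dropWhile PySem.Chars.isspace = '.' :: '.' :: '.' :: t := by
  unfold PySem.Chars.startswith PySem.Chars.strip PySem.Chars.lstrip at h
  rw [List.isPrefixOf_iff_prefix] at h
  set ls := cs.dropWhile PySem.Chars.isspace with hls
  have hsuf : (List.dropWhile PySem.Chars.isspace ls.reverse) <:+ ls.reverse := List.dropWhile_suffix _
  have hpre : PySem.Chars.rstrip ls <+: ls := by
    unfold PySem.Chars.rstrip
    have h2 : (List.dropWhile PySem.Chars.isspace ls.reverse).reverse <+: ls.reverse.reverse :=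
      List.reverse_prefix.mpr hsuf
    simpa using h2
  have h3 : ['.','.','.'] <+: ls := h.trans hpre
  obtain ⟨t, ht⟩ := h3
  exact ⟨t, ht.symm⟩

-- ---- capC: list-level capitalize_key_only and its idempotence on '...' lines ----

def capC (cs : List Char) : List Char :=
  match PySem.Chars.split₀Max cs 1 with
  | [p0, p1] => PySem.Chars.join [' '] [PySem.Chars.upper p0, p1]
  | _ => PySem.Chars.upper cs

def dotsC (cs : List Char) : Bool :=
  PySem.Chars.startswith (PySem.Chars.strip cs) ['.', '.', '.']

theorem startswith_dots_cons (t : List Char) :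
    PySem.Chars.startswith ('.' :: '.' :: '.' :: t) ['.', '.', '.'] = true := by
  simp [PySem.Chars.startswith, List.isPrefixOf]

theorem dotsC_shape (cs : List Char) (h : dotsC cs = true) :
    ∃ s, PySem.Chars.strip cs = '.' :: '.' :: '.' :: s := by
  unfold dotsC PySem.Chars.startswith at h
  rw [List.isPrefixOf_iff_prefix] at h
  obtain ⟨s, hs⟩ := h
  exact ⟨s, hs.symm⟩

theorem dotsC_upper (cs : List Char) (h : dotsC cs = true) : dotsC (PySem.Chars.upper cs) = true := by
  obtain ⟨s, hs⟩ := dotsC_shape cs h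
  unfold dotsC
  rw [strip_upper, hs]
  show PySem.Chars.startswith ('.' :: '.' :: '.' :: PySem.Chars.upper s) _ = true
  exact startswith_dots_cons _

theorem capC_dots_main (cs : List Char) (h : dotsC cs = true) :
    dotsC (capC cs) = true ∧ capC (capC cs) = capC cs := by
  obtain ⟨t, hdp⟩ := dots_shape cs h
  have hl'ne : cs.dropWhile PySem.Chars.isspace ≠ [] := by rw [hdp]; simp
  have htok : (cs.dropWhile PySem.Chars.isspace).takeWhile (fun c => !PySem.Chars.isspace c)
      = '.' :: '.' :: '.' :: (t.takeWhile (fun c => !PySem.Chars.isspace c)) := by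
    rw [hdp]; simp [List.takeWhile_cons, isspace_dot]
  by_cases hr : (((cs.dropWhile PySem.Chars.isspace).dropWhile (fun c => !PySem.Chars.isspace c)).dropWhile PySem.Chars.isspace) = []
  · have hone : capC cs = PySem.Chars.upper cs := by
      unfold capC
      rw [split1_eq]
      simp only [if_neg hl'ne, if_pos hr]
    have honeU : capC (PySem.Chars.upper cs) = PySem.Chars.upper (PySem.Chars.upper cs) := by
      unfold capC
      rw [split1_upper, split1_eq]
      simp only [if_neg hl'ne, if_pos hr]
      rfl
    refine ⟨?_, ?_⟩
    · rw [hone]; exact dotsC_upper cs h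
    · rw [hone, honeU, upper_idem]
  · set tok := (cs.dropWhile PySem.Chars.isspace).takeWhile (fun c => !PySem.Chars.isspace c) with htokdef
    set rest := (((cs.dropWhile PySem.Chars.isspace).dropWhile (fun c => !PySem.Chars.isspace c)).dropWhile PySem.Chars.isspace) with hrestdef
    have htwo : capC cs = PySem.Chars.upper tok ++ [' '] ++ rest := by
      unfold capC
      rw [split1_eq]
      simp only [← htokdef, ← hrestdef, if_neg hl'ne, if_neg hr]
      rw [PySem.Chars.join_cons_cons, PySem.Chars.join_singleton]
    have htokns : ∀ c ∈ tok, PySem.Chars.isspace c = false := by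
      intro c hc
      have := List.mem_takeWhile_imp hc
      simpa using this
    have hqns : ∀ c ∈ PySem.Chars.upper tok, PySem.Chars.isspace c = false := by
      intro c hc
      obtain ⟨d, hd, rfl⟩ := List.mem_map.mp hc
      rw [isspace_upperChar]; exact htokns d hd
    obtain ⟨d, r2, hrest⟩ : ∃ d r2, rest = d :: r2 := by
      rcases hrx : rest with _ | ⟨d, r2⟩
      · exact absurd hrx hr
      · exact ⟨d, r2, rfl⟩
    have hdns : PySem.Chars.isspace d = false :=
      dropWhile_head_false _ _ _ _ (hrestdef.symm.trans hrest)
    have huptok : PySem.Chars.upper tok = '.' :: '.' :: '.' :: PySem.Chars.upper (t.takeWhile (fun c => !PySem.Chars.isspace c)) := by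
      rw [htok]
      simp [PySem.Chars.upper, upperChar_dot]
    have hlstrip : List.dropWhile PySem.Chars.isspace (PySem.Chars.upper tok ++ [' '] ++ rest)
        = PySem.Chars.upper tok ++ [' '] ++ rest := by
      rw [huptok]
      simp [List.dropWhile_cons, isspace_dot]
    have hdots_r : dotsC (PySem.Chars.upper tok ++ [' '] ++ rest) = true := by
      unfold dotsC PySem.Chars.strip PySem.Chars.lstrip
      rw [hlstrip]
      rw [List.append_assoc]
      rw [rstrip_append_nonspace _ _ hqns, huptok]
      exact startswith_dots_cons _
    have htakr : List.takeWhile (fun c => !PySem.Chars.isspace c) (PySem.Chars.upper tok ++ [' '] ++ rest)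
        = PySem.Chars.upper tok := by
      rw [List.append_assoc, List.takeWhile_append]
      rw [List.takeWhile_eq_self_iff.mpr (by intro c hc; simp [hqns c hc])]
      simp [List.takeWhile_cons, isspace_space]
    have hdropr : List.dropWhile (fun c => !PySem.Chars.isspace c) (PySem.Chars.upper tok ++ [' '] ++ rest)
        = ' ' :: rest := by
      rw [List.append_assoc, List.dropWhile_append]
      rw [List.dropWhile_eq_nil_iff.mpr (by intro c hc; simp [hqns c hc])]
      simp [List.dropWhile_cons, isspace_space]
    have hrestr : List.dropWhile PySem.Chars.isspace (' ' :: rest) = rest := by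
      rw [List.dropWhile_cons]
      simp only [isspace_space, if_pos]
      rw [hrest, List.dropWhile_cons, hdns]
      rfl
    have hcapr : capC (PySem.Chars.upper tok ++ [' '] ++ rest) = PySem.Chars.upper tok ++ [' '] ++ rest := by
      unfold capC
      rw [split1_eq]
      simp only [hlstrip, htakr, hdropr, hrestr]
      rw [if_neg (by rw [huptok]; simp), if_neg (by rw [hrest]; simp)]
      show PySem.Chars.join [' '] [PySem.Chars.upper (PySem.Chars.upper tok), rest] = _
      rw [PySem.Chars.join_cons_cons, PySem.Chars.join_singleton, upper_idem]
    exact ⟨by rw [htwo]; exact hdots_r, by rw [htwo, hcapr]⟩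

-- ---- string-level bridges ----

theorem stripStarts_eq (l p : String) :
    stripStarts l p = PySem.Chars.startswith (PySem.Chars.strip l.toList) p.toList := by
  simp [stripStarts, PySem.Str.startswith, PySem.Str.strip, String.toList_ofList]

theorem dots_toList (l : String) : stripStarts l "..." = dotsC l.toList := by
  rw [stripStarts_eq]; rfl

theorem cap_toList (l : String) : (capitalize_key_only l).toList = capC l.toList := by
  unfold capitalize_key_only capC
  show (match PySem.Str.split₀Max l 1 with
        | [p0, p1] => PySem.Str.join " " [PySem.Str.upper p0, p1]
        | _ => PySem.Str.upper l).toList = _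
  unfold PySem.Str.split₀Max
  rcases PySem.Chars.split₀Max l.toList 1 with _ | ⟨a, _ | ⟨b, _ | ⟨c, t⟩⟩⟩ <;>
    simp [PySem.Str.join, PySem.Str.upper, String.toList_ofList]

theorem string_eq_of_toList {s t : String} (h : s.toList = t.toList) : s = t := by
  have := congrArg String.ofList h
  simpa [String.ofList_toList] using this

theorem dots_cap (l : String) (h : stripStarts l "..." = true) :
    stripStarts (capitalize_key_only l) "..." = true := by
  rw [dots_toList, cap_toList]
  exact (capC_dots_main l.toList (by rw [← dots_toList]; exact h)).1

theorem cap_idem (l : String) (h : stripStarts l "..." = true) :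
    capitalize_key_only (capitalize_key_only l) = capitalize_key_only l := by
  apply string_eq_of_toList
  rw [cap_toList, cap_toList]
  exact (capC_dots_main l.toList (by rw [← dots_toList]; exact h)).2

-- ---- line classification ----

theorem startswith_shape {cs p : List Char} (h : PySem.Chars.startswith cs p = true) :
    ∃ t, cs = p ++ t := by
  unfold PySem.Chars.startswith at h
  rw [List.isPrefixOf_iff_prefix] at h
  obtain ⟨t, ht⟩ := h
  exact ⟨t, ht.symm⟩

theorem start_not_dots (l : String) (h : (stripStarts l ".PUNKT" || stripStarts l ".KURVE") = true) :
    stripStarts l "..." = false := by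
  rw [stripStarts_eq]
  rcases Bool.or_eq_true_iff.mp h with h1 | h1 <;>
  · rw [stripStarts_eq] at h1
    obtain ⟨t, ht⟩ := startswith_shape h1
    rw [ht]
    simp [PySem.Chars.startswith, List.isPrefixOf]

theorem start_not_kval (l : String) (h : (stripStarts l ".PUNKT" || stripStarts l ".KURVE") = true) :
    stripStarts l "..KVALITET" = false := by
  rw [stripStarts_eq]
  rcases Bool.or_eq_true_iff.mp h with h1 | h1 <;>
  · rw [stripStarts_eq] at h1
    obtain ⟨t, ht⟩ := startswith_shape h1
    rw [ht]
    simp [PySem.Chars.startswith, List.isPrefixOf]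

theorem start_not_close (l : String) (h : (stripStarts l ".PUNKT" || stripStarts l ".KURVE") = true) :
    stripStarts l ".." = false := by
  rw [stripStarts_eq]
  rcases Bool.or_eq_true_iff.mp h with h1 | h1 <;>
  · rw [stripStarts_eq] at h1
    obtain ⟨t, ht⟩ := startswith_shape h1
    rw [ht]
    simp [PySem.Chars.startswith, List.isPrefixOf]

theorem kval_not_dots (l : String) (h : stripStarts l "..KVALITET" = true) :
    stripStarts l "..." = false := by
  rw [stripStarts_eq] at h ⊢
  obtain ⟨t, ht⟩ := startswith_shape h
  rw [ht]
  simp [PySem.Chars.startswith, List.isPrefixOf]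

-- ---- reference normal form: per-block capping rule ----

def stepOpn (l : String) (opn : Bool) : Bool :=
  if stripStarts l "..KVALITET" then true
  else if stripStarts l ".." && !stripStarts l "..." then false
  else opn

def opnEnd : List String → Bool → Bool
  | [], opn => opn
  | l :: r, opn => opnEnd r (stepOpn l opn)

def capAll : List String → Bool → Bool
  | [], opn => opn
  | l :: r, opn =>
      if stripStarts l "..KVALITET" then capAll r true
      else if stripStarts l ".." && !stripStarts l "..." then (opn || capAll r false)
      else capAll r opn

def tailOut : List String → Bool → List String
  | [], _ => []
  | l :: r, opn =>
      (if stripStarts l "..." && capAll r (stepOpn l opn) then capitalize_key_only l else l)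
        :: tailOut r (stepOpn l opn)

def capAllTop : List String → Bool → Bool
  | [], opn => opn
  | l :: r, opn =>
      if stripStarts l ".PUNKT" || stripStarts l ".KURVE" then opn
      else if stripStarts l "..KVALITET" then capAllTop r true
      else if stripStarts l ".." && !stripStarts l "..." then (opn || capAllTop r false)
      else capAllTop r opn

def restOut : List String → Bool → List String
  | [], _ => []
  | l :: r, opn =>
      if stripStarts l ".PUNKT" || stripStarts l ".KURVE" then l :: restOut r false
      else
        (if stripStarts l "..." && capAllTop r (stepOpn l opn) then capitalize_key_only l else l)
          :: restOut r (stepOpn l opn)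

theorem opnEnd_cons (l : String) (r : List String) (s : Bool) :
    opnEnd (l :: r) s = opnEnd r (stepOpn l s) := rfl

theorem capAll_cons (l : String) (r : List String) (s : Bool) :
    capAll (l :: r) s =
      (if stripStarts l "..KVALITET" then capAll r true
       else if stripStarts l ".." && !stripStarts l "..." then (s || capAll r false)
       else capAll r s) := rfl

theorem tailOut_cons (l : String) (r : List String) (s : Bool) :
    tailOut (l :: r) s =
      (if stripStarts l "..." && capAll r (stepOpn l s) then capitalize_key_only l else l)
        :: tailOut r (stepOpn l s) := rfl

theorem capAllTop_cons (l : String) (r : List String) (s : Bool) :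
    capAllTop (l :: r) s =
      (if stripStarts l ".PUNKT" || stripStarts l ".KURVE" then s
       else if stripStarts l "..KVALITET" then capAllTop r true
       else if stripStarts l ".." && !stripStarts l "..." then (s || capAllTop r false)
       else capAllTop r s) := rfl

theorem restOut_cons (l : String) (r : List String) (s : Bool) :
    restOut (l :: r) s =
      (if stripStarts l ".PUNKT" || stripStarts l ".KURVE" then l :: restOut r false
       else
         (if stripStarts l "..." && capAllTop r (stepOpn l s) then capitalize_key_only l else l)
           :: restOut r (stepOpn l s)) := rfl

theorem capAll_true (r : List String) : capAll r true = true := by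
  induction r with
  | nil => rfl
  | cons l r ih =>
    unfold capAll
    split
    · exact ih
    · split
      · simp
      · exact ih

theorem capAllTop_true (r : List String) : capAllTop r true = true := by
  induction r with
  | nil => rfl
  | cons l r ih =>
    unfold capAllTop
    split
    · rfl
    · split
      · exact ih
      · split
        · simp
        · exact ih

theorem capAll_of_opnEnd (r : List String) (s : Bool) (h : opnEnd r s = true) : capAll r s = true := by
  induction r generalizing s with
  | nil => exact h
  | cons l r ih =>
    have h' : opnEnd r (stepOpn l s) = true := h
    unfold capAll
    by_cases h1 : stripStarts l "..KVALITET" = true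
    · rw [if_pos h1]
      exact ih _ (by simpa [stepOpn, h1] using h')
    · rw [if_neg h1]
      by_cases h2 : (stripStarts l ".." && !stripStarts l "...") = true
      · rw [if_pos h2]
        have := ih _ (by simpa [stepOpn, h1, h2] using h')
        simp [this]
      · rw [if_neg h2]
        exact ih _ (by simpa [stepOpn, h1, h2] using h')

-- ---- recapLine facts ----

theorem recapLine_not_dots (l : String) (h : stripStarts l "..." = false) : recapLine l = l := by
  unfold recapLine; rw [h]; rfl

theorem recapLine_idem (l : String) : recapLine (recapLine l) = recapLine l := by
  unfold recapLine
  by_cases h : stripStarts l "..." = true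
  · rw [if_pos h, if_pos (dots_cap l h), cap_idem l h]
  · rw [if_neg h, if_neg h]

theorem recap_map_idem (cur : List String) :
    (cur.map recapLine).map recapLine = cur.map recapLine := by
  induction cur with
  | nil => rfl
  | cons a t ih => simp only [List.map_cons, recapLine_idem, ih]

theorem recapLine_eq_ite (l : String) :
    (if stripStarts l "..." = true then capitalize_key_only l else l) = recapLine l := rfl

theorem recapLine_capEntry (l : String) (c : Bool) :
    recapLine (if stripStarts l "..." && c then capitalize_key_only l else l) = recapLine l := by
  by_cases h : stripStarts l "..." = true
  · cases c
    · simp [h]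
    · simp only [h, Bool.and_true, if_pos]
      unfold recapLine
      rw [if_pos h, if_pos (dots_cap l h), cap_idem l h]
  · have h' : stripStarts l "..." = false := by simpa using h
    simp [h']

theorem missingKvGo_nil (modified cur : List String) (pres opn : Bool) :
    missingKvGo [] modified cur pres opn
      = modified ++ (if cur.isEmpty then [] else if pres then cur.map recapLine else cur) := rfl

theorem missingKvGo_cons (l : String) (rest modified cur : List String) (pres opn : Bool) :
    missingKvGo (l :: rest) modified cur pres opn =
      (if stripStarts l ".PUNKT" || stripStarts l ".KURVE" then
        missingKvGo rest (modified ++ (if cur.isEmpty then [] else if pres then cur.map recapLine else cur)) [l] false false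
      else if stripStarts l "..KVALITET" then
        missingKvGo rest modified (cur ++ [l]) true true
      else if stripStarts l ".." && !stripStarts l "..." then
        (if opn then missingKvGo rest modified (cur.map recapLine ++ [l]) false false
         else missingKvGo rest modified (cur ++ [l]) pres opn)
      else if opn && stripStarts l "..." then
        missingKvGo rest modified (cur ++ [capitalize_key_only l]) pres opn
      else missingKvGo rest modified (cur ++ [l]) pres opn) := rfl

theorem flush_eq (cur : List String) (opn : Bool) :
    (if cur.isEmpty then [] else if opn then cur.map recapLine else cur)
      = (if opn then cur.map recapLine else cur) := by
  cases cur <;> cases opn <;> simp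

theorem A_side (lines : List String) (modified cur : List String) (opn : Bool) :
    missingKvGo lines modified cur opn opn
      = modified ++ (if capAllTop lines opn then cur.map recapLine else cur) ++ restOut lines opn := by
  induction lines generalizing modified cur opn with
  | nil =>
    rw [missingKvGo_nil, flush_eq]
    show _ = modified ++ (if opn then cur.map recapLine else cur) ++ []
    simp
  | cons l rest ih =>
    rw [missingKvGo_cons, capAllTop_cons, restOut_cons]
    by_cases hS : (stripStarts l ".PUNKT" || stripStarts l ".KURVE") = true
    · rw [if_pos hS, if_pos hS, if_pos hS, flush_eq, ih]
      have hd : stripStarts l "..." = false := start_not_dots l hS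
      rw [show ([l].map recapLine) = [l] by simp [recapLine_not_dots l hd]]
      rw [ite_self]
      simp
    · rw [if_neg hS, if_neg hS, if_neg hS]
      by_cases hK : stripStarts l "..KVALITET" = true
      · rw [if_pos hK, if_pos hK, ih]
        have hd : stripStarts l "..." = false := kval_not_dots l hK
        have hso : stepOpn l opn = true := by simp [stepOpn, hK]
        rw [hso, capAllTop_true, if_pos rfl]
        simp [hd, List.map_append, recapLine_not_dots l hd]
      · rw [if_neg hK, if_neg hK]
        by_cases hC : (stripStarts l ".." && !stripStarts l "...") = true
        · rw [if_pos hC, if_pos hC]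
          have hd : stripStarts l "..." = false := by
            rcases Bool.and_eq_true_iff.mp hC with ⟨-, h2⟩
            simpa using h2
          have hso : stepOpn l opn = false := by simp [stepOpn, hK, hC]
          rw [hso]
          cases opn with
          | true =>
            rw [if_pos rfl, ih]
            simp only [Bool.true_or, if_pos rfl]
            rcases hCT : capAllTop rest false with _ | _
            · simp [hCT, hd, List.map_append, recapLine_not_dots l hd, recap_map_idem]
            · simp [hCT, hd, List.map_append, recapLine_not_dots l hd, recap_map_idem]
              exact fun a _ => recapLine_idem a
          | false =>
            rw [if_neg (by simp), ih]
            simp only [Bool.false_or]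
            rcases hCT : capAllTop rest false with _ | _
            · simp [hCT, hd, List.map_append, recapLine_not_dots l hd]
            · simp [hCT, hd, List.map_append, recapLine_not_dots l hd]
        · rw [if_neg hC, if_neg hC]
          have hso : stepOpn l opn = opn := by simp [stepOpn, hK, hC]
          rw [hso]
          by_cases hOD : (opn && stripStarts l "...") = true
          · rcases Bool.and_eq_true_iff.mp hOD with ⟨ho, hd⟩
            subst ho
            rw [if_pos (by simp [hd]), ih, capAllTop_true, if_pos rfl]
            simp [hd, capAllTop_true, List.map_append, recapLine]
            exact fun _ => cap_idem l hd
          · rw [if_neg hOD, ih]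
            rcases hCT : capAllTop rest opn with _ | _
            · simp [hCT, List.map_append]
            · simp [hCT, List.map_append, recapLine]

theorem scanStepB_cases (st : Bool × Bool × Int) (l : String) (j : Nat) :
    scanStepB st (l, j) = (true, true, st.2.2) ∨ scanStepB st (l, j) = (false, false, (j : Int)) ∨ scanStepB st (l, j) = st := by
  unfold scanStepB
  split
  · left; rfl
  · split
    · split
      · right; left; rfl
      · right; right; rfl
    · right; right; rfl

theorem scan_lc_mono (r : List String) (st : Bool × Bool × Int) (j : Nat) :
    ((r.zipIdx j).foldl scanStepB st).2.2 = st.2.2 ∨ (j : Int) ≤ ((r.zipIdx j).foldl scanStepB st).2.2 := by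
  induction r generalizing st j with
  | nil => left; rfl
  | cons l r ih =>
    rw [List.zipIdx_cons, List.foldl_cons]
    have h1 : (scanStepB st (l, j)).2.2 = st.2.2 ∨ (scanStepB st (l, j)).2.2 = (j : Int) := by
      rcases scanStepB_cases st l j with h | h | h <;> rw [h]
      · left; rfl
      · right; rfl
      · left; rfl
    rcases ih (scanStepB st (l, j)) (j+1) with h2 | h2
    · rcases h1 with h1 | h1
      · left; rw [h2, h1]
      · right; rw [h2, h1]
    · right
      push_cast at h2
      omega

theorem decide_shift (j : Nat) (lc v : Int) (hlt : lc < (j : Int))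
    (hM : v = lc ∨ ((j : Int) + 1) ≤ v) :
    decide ((j : Int) ≤ v) = decide (((j + 1 : Nat) : Int) ≤ v) := by
  rw [decide_eq_decide]
  push_cast
  omega

theorem scan_capAll (r : List String) (opn : Bool) (j : Nat) (lc : Int) (h : lc < (j : Int)) :
    (((r.zipIdx j).foldl scanStepB (opn, opn, lc)).2.1
      || decide ((j : Int) ≤ ((r.zipIdx j).foldl scanStepB (opn, opn, lc)).2.2)) = capAll r opn := by
  induction r generalizing opn j lc with
  | nil =>
    show (opn || decide ((j : Int) ≤ lc)) = opn
    have : ¬ ((j : Int) ≤ lc) := by omega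
    simp [this]
  | cons l r ih =>
    rw [List.zipIdx_cons, List.foldl_cons, capAll_cons]
    by_cases hK : stripStarts l "..KVALITET" = true
    · have hst : scanStepB (opn, opn, lc) (l, j) = (true, true, lc) := by
        simp [scanStepB, hK]
      rw [hst, if_pos hK]
      have hM := scan_lc_mono r (true, true, lc) (j+1)
      rw [decide_shift j lc _ h (by push_cast at hM ⊢; omega)]
      exact ih true (j+1) lc (by push_cast; omega)
    · rw [if_neg hK]
      by_cases hC : (stripStarts l ".." && !stripStarts l "...") = true
      · rw [if_pos hC]
        cases opn with
        | true =>
          have hst : scanStepB (true, true, lc) (l, j) = (false, false, (j : Int)) := by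
            simp [scanStepB, hK, hC]
          rw [hst]
          have hM := scan_lc_mono r (false, false, (j : Int)) (j+1)
          have hj : ((j : Int) ≤ ((r.zipIdx (j+1)).foldl scanStepB (false, false, (j:Int))).2.2) := by
            push_cast at hM; omega
          simp [hj]
        | false =>
          have hst : scanStepB (false, false, lc) (l, j) = (false, false, lc) := by
            simp [scanStepB, hK, hC]
          rw [hst]
          have hM := scan_lc_mono r (false, false, lc) (j+1)
          rw [decide_shift j lc _ h (by push_cast at hM ⊢; omega)]
          simpa using ih false (j+1) lc (by push_cast; omega)
      · rw [if_neg hC]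
        have hst : scanStepB (opn, opn, lc) (l, j) = (opn, opn, lc) := by
          simp [scanStepB, hK, hC]
        rw [hst]
        have hM := scan_lc_mono r (opn, opn, lc) (j+1)
        rw [decide_shift j lc _ h (by push_cast at hM ⊢; omega)]
        exact ih opn (j+1) lc (by push_cast; omega)

set_option maxHeartbeats 1000000 in
theorem block_map_eq (b : List String) (opn : Bool) (k : Nat) (lc : Int) (h : lc < (k : Int)) :
    ((b.zipIdx k).map (fun p =>
      if stripStarts p.1 "..." && (((b.zipIdx k).foldl scanStepB (opn, opn, lc)).2.1
          || decide ((p.2 : Int) < ((b.zipIdx k).foldl scanStepB (opn, opn, lc)).2.2))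
      then capitalize_key_only p.1 else p.1)) = tailOut b opn := by
  induction b generalizing opn k lc with
  | nil => rfl
  | cons l b ih =>
    obtain ⟨o, lc1, hst, hlt1, hso⟩ :
        ∃ o lc1, scanStepB (opn, opn, lc) (l, k) = (o, o, lc1) ∧ lc1 < ((k+1 : Nat) : Int) ∧ stepOpn l opn = o := by
      by_cases hK : stripStarts l "..KVALITET" = true
      · exact ⟨true, lc, by simp [scanStepB, hK], by push_cast; omega, by simp [stepOpn, hK]⟩
      · by_cases hC : (stripStarts l ".." && !stripStarts l "...") = true
        · cases opn with
          | true => exact ⟨false, (k : Int), by simp [scanStepB, hK, hC], by push_cast; omega, by simp [stepOpn, hK, hC]⟩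
          | false => exact ⟨false, lc, by simp [scanStepB, hK, hC], by push_cast; omega, by simp [stepOpn, hK, hC]⟩
        · exact ⟨opn, lc, by simp [scanStepB, hK, hC], by push_cast; omega, by simp [stepOpn, hK, hC]⟩
    rw [tailOut_cons, hso]
    simp only [List.zipIdx_cons, List.foldl_cons, List.map_cons, hst]
    have hconv : decide ((k : Int) < ((b.zipIdx (k+1)).foldl scanStepB (o, o, lc1)).2.2)
        = decide (((k+1 : Nat) : Int) ≤ ((b.zipIdx (k+1)).foldl scanStepB (o, o, lc1)).2.2) := by
      rw [decide_eq_decide]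
      push_cast
      omega
    rw [hconv, scan_capAll b o (k+1) lc1 hlt1]
    congr 1
    exact ih o (k+1) lc1 hlt1

theorem processBlock_eq (b : List String) : processBlockB b = tailOut b false := by
  unfold processBlockB
  exact block_map_eq b false 0 (-1) (by norm_num)

theorem opnEnd_append (u v : List String) (s : Bool) : opnEnd (u ++ v) s = opnEnd v (opnEnd u s) := by
  induction u generalizing s with
  | nil => rfl
  | cons l u ih => simpa [opnEnd] using ih (stepOpn l s)

theorem capAll_append (u v : List String) (s : Bool) :
    capAll (u ++ v) s = (capAll u s || capAll v (opnEnd u s)) := by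
  induction u generalizing s with
  | nil =>
    show capAll v s = (s || capAll v s)
    cases s
    · rfl
    · rw [capAll_true]; rfl
  | cons l u ih =>
    rw [List.cons_append, capAll_cons, capAll_cons, opnEnd_cons]
    by_cases h1 : stripStarts l "..KVALITET" = true
    · rw [if_pos h1, if_pos h1, ih]
      simp [stepOpn, h1]
    · rw [if_neg h1, if_neg h1]
      by_cases h2 : (stripStarts l ".." && !stripStarts l "...") = true
      · rw [if_pos h2, if_pos h2, ih]
        simp [stepOpn, h1, h2, Bool.or_assoc]
      · rw [if_neg h2, if_neg h2, ih]
        simp [stepOpn, h1, h2]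

theorem tailOut_append (u v : List String) (s : Bool) :
    tailOut (u ++ v) s
      = (if capAll v (opnEnd u s) then (tailOut u s).map recapLine else tailOut u s)
        ++ tailOut v (opnEnd u s) := by
  induction u generalizing s with
  | nil =>
    show tailOut v s = (if capAll v s then ([] : List String).map recapLine else []) ++ tailOut v s
    cases capAll v s <;> simp
  | cons l u ih =>
    rw [List.cons_append, tailOut_cons, tailOut_cons, ih (stepOpn l s), opnEnd_cons, capAll_append]
    set s' := stepOpn l s
    set C := capAll v (opnEnd u s')
    by_cases hC : C = true
    · rw [hC]
      simp only [Bool.or_true, if_pos, List.map_cons, recapLine_capEntry]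
      have : (stripStarts l "..." && true) = stripStarts l "..." := by simp
      rw [this]
      unfold recapLine
      by_cases hd : stripStarts l "..." = true <;> simp [hd]
    · have hC' : C = false := by simpa using hC
      rw [hC']
      simp

theorem recap_tailOut_of_opnEnd (u : List String) (s : Bool) (h : opnEnd u s = true) :
    (tailOut u s).map recapLine = tailOut u s := by
  induction u generalizing s with
  | nil => rfl
  | cons l u ih =>
    have h' : opnEnd u (stepOpn l s) = true := h
    rw [tailOut_cons, List.map_cons, recapLine_capEntry, ih _ h']
    rw [capAll_of_opnEnd u (stepOpn l s) h']
    unfold recapLine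
    by_cases hd : stripStarts l "..." = true <;> simp [hd]

theorem recap_T_if (cur : List String) (s : Bool) (hs : opnEnd cur false = s) :
    (if s then (tailOut cur false).map recapLine else tailOut cur false) = tailOut cur false := by
  cases hx : s
  · rfl
  · simpa using recap_tailOut_of_opnEnd cur false (by rw [hs, hx])

theorem splitBlocksB_nil (cur : List String) :
    splitBlocksB [] cur = (if cur.isEmpty then [] else [cur]) := rfl

theorem splitBlocksB_cons (l : String) (rest cur : List String) :
    splitBlocksB (l :: rest) cur =
      (if stripStarts l ".PUNKT" || stripStarts l ".KURVE" then
        (if cur.isEmpty then [] else [cur]) ++ splitBlocksB rest [l]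
      else splitBlocksB rest (cur ++ [l])) := rfl

theorem B_side (lines : List String) (cur : List String) :
    (splitBlocksB lines cur).flatMap (fun b => tailOut b false)
      = (if capAllTop lines (opnEnd cur false) then (tailOut cur false).map recapLine else tailOut cur false)
        ++ restOut lines (opnEnd cur false) := by
  induction lines generalizing cur with
  | nil =>
    rw [splitBlocksB_nil]
    show _ = (if opnEnd cur false then (tailOut cur false).map recapLine else tailOut cur false) ++ []
    rw [recap_T_if cur _ rfl, List.append_nil]
    cases cur with
    | nil => rfl
    | cons a t => simp
  | cons l rest ih =>
    rw [splitBlocksB_cons, capAllTop_cons, restOut_cons]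
    by_cases hS : (stripStarts l ".PUNKT" || stripStarts l ".KURVE") = true
    · rw [if_pos hS, if_pos hS, if_pos hS, List.flatMap_append, ih [l]]
      have hd : stripStarts l "..." = false := start_not_dots l hS
      have hso : stepOpn l false = false := by
        simp [stepOpn, start_not_kval l hS, start_not_close l hS]
      have h1 : opnEnd [l] false = false := by rw [opnEnd_cons, hso]; rfl
      have h2 : tailOut [l] false = [l] := by
        rw [tailOut_cons]
        simp [hd, tailOut]
      rw [h1, h2]
      rw [show ([l].map recapLine) = [l] by simp [recapLine_not_dots l hd]]
      rw [ite_self, recap_T_if cur _ rfl]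
      cases cur with
      | nil => simp [tailOut]
      | cons a t => simp
    · rw [if_neg hS, if_neg hS, if_neg hS, ih (cur ++ [l])]
      have hoe : opnEnd (cur ++ [l]) false = stepOpn l (opnEnd cur false) := by
        rw [opnEnd_append]
        rfl
      have hta : tailOut (cur ++ [l]) false
          = (if capAll [l] (opnEnd cur false) then (tailOut cur false).map recapLine else tailOut cur false)
            ++ [if stripStarts l "..." && stepOpn l (opnEnd cur false) then capitalize_key_only l else l] := by
        rw [tailOut_append]
        congr 1
      rw [hoe, hta]
      set s := opnEnd cur false with hsdef
      set T := tailOut cur false with hTdef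
      by_cases hK : stripStarts l "..KVALITET" = true
      · have hd : stripStarts l "..." = false := kval_not_dots l hK
        have hso : stepOpn l s = true := by simp [stepOpn, hK]
        have hca : capAll [l] s = true := by
          rw [capAll_cons, if_pos hK]
          rfl
        rw [if_pos hK, hso, hca, capAllTop_true]
        simp [hd, recapLine_not_dots l hd, recap_map_idem, recapLine_idem]
      · by_cases hC : (stripStarts l ".." && !stripStarts l "...") = true
        · have hd : stripStarts l "..." = false := by
            rcases Bool.and_eq_true_iff.mp hC with ⟨-, h2⟩
            simpa using h2
          have hso : stepOpn l s = false := by simp [stepOpn, hK, hC]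
          have hca : capAll [l] s = s := by
            rw [capAll_cons, if_neg hK, if_pos hC]
            show (s || capAll [] false) = s
            rw [show capAll [] false = false from rfl]
            simp
          rw [if_neg hK, if_pos hC, hso, hca]
          rcases hCT : capAllTop rest false with _ | _
          · by_cases hx : s = true
            · rw [hx]; simp [hCT, hd]
            · rw [show s = false by simpa using hx]; simp [hCT, hd]
          · by_cases hx : s = true
            · rw [hx]
              simp [hCT, hd, recapLine_not_dots l hd, List.map_append, Function.comp_def, recapLine_idem, recapLine_eq_ite]
            · rw [show s = false by simpa using hx]
              simp [hCT, hd, recapLine_not_dots l hd, List.map_append, recapLine_eq_ite]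
        · have hso : stepOpn l s = s := by simp [stepOpn, hK, hC]
          have hca : capAll [l] s = s := by
            rw [capAll_cons, if_neg hK, if_neg hC]
            rfl
          rw [if_neg hK, if_neg hC, hso, hca]
          rcases hCT : capAllTop rest s with _ | _
          · have hsf : s = false := by
              by_contra hx
              rw [show s = true by simpa using hx, capAllTop_true] at hCT
              exact absurd hCT (by simp)
            rw [hsf] at hCT
            rw [hsf]
            simp [hCT]
          · by_cases hx : s = true
            · rw [hx] at hCT
              rw [hx]
              simp [hCT, List.map_append, Function.comp_def, recapLine_idem, recapLine_eq_ite, recapLine_capEntry]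
            · rw [show s = false by simpa using hx] at hCT
              rw [show s = false by simpa using hx]
              simp [hCT, List.map_append, recapLine_eq_ite, recapLine_capEntry]

-- ===== VERDICT (by name: the statement is the Claim_ definition above) =====
theorem missing_kvalitet_spec : Claim_equal_missing_kvalitet := by
  intro lines _dom
  unfold Spec_missing_kvalitet
  have hA : missing_kvalitet lines = restOut lines false := by
    unfold missing_kvalitet
    rw [A_side lines [] [] false]
    simp
  have hB : missing_kvalitet_alt lines = restOut lines false := by
    unfold missing_kvalitet_alt
    have hpb : processBlockB = fun b => tailOut b false := funext processBlock_eq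
    rw [hpb, B_side lines []]
    simp [opnEnd, tailOut]
  rw [hA, hB]
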